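-- pv_equiv track=rewrite | github.com/kmss6905/algorithm | 프로그래머스/1/135808. 과일 장수/과일 장수.py | solution
-- ===== SOURCE A (Python) =====
-- def solution(k, m, score):
--     answer = 0
--     score = sorted(score, reverse=True)
--     ac = 0
--     mac = 9
--     for i in range(len(score)):
--         ac += 1
--         mac = min(mac, score[i])
--         if ac == m:
--             answer += (mac * m)
--             ac = 0
--             mac = 9
--
--     return answer
-- ===== SOURCE B (Python) =====
-- def solution(k, m, score):
--     if m <= 0:
--         return 0
--     s = sorted(score, reverse=True)
--     total = 0
--     # each full group of m fruit (descending order) is priced at its minimum,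
--     # capped at 9 as in the original; the minimum of a descending group is its
--     # last element s[m-1]
--     while len(s) >= m:
--         total += min(9, s[m - 1]) * m
--         s = s[m:]
--     return total
-- ===== Notes on version B (the rewrite author's own statement) =====
-- stated objective: simpler
-- what changed: A scans every element of the descending-sorted list maintaining a group counter and a running minimum; B drops that state machine and consumes the sorted list one m-sized chunk at a time, pricing each chunk directly at min(9, its last element), which is its minimum because the list is descending.
import Mathlib
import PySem

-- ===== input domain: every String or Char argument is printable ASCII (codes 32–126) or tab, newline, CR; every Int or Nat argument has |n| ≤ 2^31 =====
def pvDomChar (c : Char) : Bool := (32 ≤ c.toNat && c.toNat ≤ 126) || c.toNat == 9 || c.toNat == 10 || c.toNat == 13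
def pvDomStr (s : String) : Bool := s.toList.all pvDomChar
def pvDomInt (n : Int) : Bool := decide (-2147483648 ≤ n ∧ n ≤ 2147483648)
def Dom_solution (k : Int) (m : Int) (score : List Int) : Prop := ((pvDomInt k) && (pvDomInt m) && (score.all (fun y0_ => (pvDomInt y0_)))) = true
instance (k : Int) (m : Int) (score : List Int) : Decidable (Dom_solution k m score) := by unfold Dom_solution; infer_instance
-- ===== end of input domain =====

-- B replaces A's per-element counter/running-min loop by a chunked loop that prices each
-- descending group of m directly at min(9, s[m-1]); objective: simpler.


-- ===== PORT A =====
-- loop body of A: ac += 1; mac = min(mac, score[i]); if ac == m: answer += mac*m; ac = 0; mac = 9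
def stepA (m : Int) (st : Int × Int × Int) (x : Int) : Int × Int × Int :=
  let ac := st.2.1 + 1
  let mac := min st.2.2 x
  if ac = m then (st.1 + mac * m, 0, 9) else (st.1, ac, mac)

-- 'for i in range(len(score)): … score[i] …' is folded over the sorted list itself (i is in range)
def solution (k : Int) (m : Int) (score : List Int) : Int :=
  let s := PySem.List.sorted score (fun x => x) true
  (s.foldl (stepA m) (0, 0, 9)).1

-- ===== PORT B =====
-- 'while len(s) >= m: total += min(9, s[m-1])*m; s = s[m:]'; the '1 ≤ m' conjunct is a
-- totality guard only (the caller branch guarantees it); s[m:] with m ≥ 1 is drop, exact.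
def solutionAltLoop (m : Int) (s : List Int) (total : Int) : Int :=
  if _h : 1 ≤ m ∧ m ≤ (s.length : Int) then
    solutionAltLoop m (s.drop m.toNat) (total + min 9 (PySem.List.pyGetD s (m - 1) 0) * m)
  else total
termination_by s.length
decreasing_by simp [List.length_drop]; omega

def solution_alt (k : Int) (m : Int) (score : List Int) : Int :=
  if m ≤ 0 then 0
  else solutionAltLoop m (PySem.List.sorted score (fun x => x) true) 0

-- ===== PRECONDITION & SPEC =====
def Spec_solution (k : Int) (m : Int) (score : List Int) (out : Int) : Prop := out = solution_alt k m score
instance (k : Int) (m : Int) (score : List Int) (out : Int) : Decidable (Spec_solution k m score out) := by unfold Spec_solution; infer_instance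

-- ===== CLAIM (what is proved, stated in full; the proofs are below) =====
def Claim_equal_solution : Prop := ∀ (k : Int) (m : Int) (score : List Int), Dom_solution k m score → Spec_solution k m score (solution k m score)

-- ===== LEMMAS AND PROOFS =====

-- with m ≤ 0 the counter (≥ 1 throughout) never equals m, so answer never changes
lemma foldl_nonpos (m : Int) (hm : m ≤ 0) (l : List Int) :
    ∀ a i v : Int, 0 ≤ i → (l.foldl (stepA m) (a, i, v)).1 = a := by
  induction l with
  | nil => intro a i v _; rfl
  | cons x t ih =>
      intro a i v hi
      have : stepA m (a, i, v) x = (a, i + 1, min v x) := by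
        simp [stepA]; omega
      simp only [List.foldl_cons, this]
      exact ih a (i + 1) (min v x) (by omega)

-- folding fewer than m - i elements never triggers the group payout
lemma foldl_small (m : Int) (l : List Int) :
    ∀ a i v : Int, 0 ≤ i → i + l.length < m →
      l.foldl (stepA m) (a, i, v) = (a, i + l.length, l.foldl min v) := by
  induction l with
  | nil => intro a i v _ _; simp
  | cons x t ih =>
      intro a i v hi hlen
      simp only [List.length_cons] at hlen
      have hstep : stepA m (a, i, v) x = (a, i + 1, min v x) := by
        simp [stepA]; omega
      simp only [List.foldl_cons, hstep]
      rw [ih a (i + 1) (min v x) (by omega) (by push_cast at hlen ⊢; omega)]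
      have h2 : i + 1 + (t.length : Int) = i + ((x :: t).length : Int) := by
        push_cast [List.length_cons]; ring
      rw [h2]

-- folding exactly one group of m from a fresh state pays min over the group (seeded with 9)
lemma foldl_chunk (m : Int) (hm : 1 ≤ m) (c : List Int) (hc : (c.length : Int) = m) (a : Int) :
    c.foldl (stepA m) (a, 0, 9) = (a + (c.foldl min 9) * m, 0, 9) := by
  rcases c.eq_nil_or_concat with rfl | ⟨d, x, rfl⟩
  · simp at hc; omega
  · rw [List.concat_eq_append] at hc ⊢
    rw [List.foldl_append]
    rw [foldl_small m d a 0 9 le_rfl (by simp at hc ⊢; omega)]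
    have hm' : (0 : Int) + (d.length : Int) + 1 = m := by simp at hc; omega
    have hlast : stepA m (a, (0 : Int) + d.length, d.foldl min 9) x
        = (a + (min (d.foldl min 9) x) * m, 0, 9) := by
      simp only [stepA]
      rw [if_pos hm']
    simp only [List.foldl_cons, List.foldl_nil, hlast]
    rw [List.foldl_append]
    rfl

-- on a descending list the running min (seeded with v) is min of v and the last element
lemma foldl_min_desc (c : List Int) (hp : c.Pairwise (fun a b => b ≤ a)) (hne : c ≠ []) :
    ∀ v : Int, c.foldl min v = min v (c.getLast hne) := by
  induction c with
  | nil => exact absurd rfl hne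
  | cons x t ih =>
      intro v
      cases t with
      | nil => simp
      | cons y u =>
          have hp' : (y :: u).Pairwise (fun a b => b ≤ a) := hp.of_cons
          have hL : (y :: u).getLast (by simp) ≤ x := by
            have := List.pairwise_cons.mp hp |>.1
            exact this _ (List.getLast_mem _)
          have hgl : (x :: y :: u).getLast hne = (y :: u).getLast (by simp) :=
            List.getLast_cons (by simp)
          rw [hgl, List.foldl_cons, ih hp' (by simp) (min v x)]
          omega

lemma main_loop (m : Int) (hm : 1 ≤ m) :
    ∀ (n : Nat) (s : List Int), s.length = n → s.Pairwise (fun a b => b ≤ a) →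
      ∀ a : Int, (s.foldl (stepA m) (a, 0, 9)).1 = solutionAltLoop m s a := by
  intro n
  induction n using Nat.strong_induction_on with
  | _ n ih =>
      intro s hlen hp a
      by_cases hsm : m ≤ (s.length : Int)
      · have htklen : ((s.take m.toNat).length : Int) = m := by
          simp [List.length_take]; omega
        have hne : s.take m.toNat ≠ [] := by
          intro h; rw [h] at htklen; simp at htklen; omega
        conv_lhs => rw [← List.take_append_drop m.toNat s, List.foldl_append]
        rw [foldl_chunk m hm _ htklen a]
        rw [solutionAltLoop]
        rw [dif_pos ⟨hm, hsm⟩]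
        have hdlen : (s.drop m.toNat).length < n := by
          simp [List.length_drop]; omega
        rw [ih _ hdlen _ rfl (hp.sublist (List.drop_sublist _ _)) _]
        congr 2
        -- min over the first group = min 9 s[m-1]
        have htp : (s.take m.toNat).Pairwise (fun a b => b ≤ a) :=
          hp.sublist (List.take_sublist _ _)
        rw [foldl_min_desc _ htp hne 9]
        congr 1
        have hmlt : (m - 1).toNat < s.length := by omega
        rw [PySem.List.pyGetD_eq_getElem s 0 (by omega) (by omega)]
        rw [List.getLast_eq_getElem]
        have : (s.take m.toNat).length - 1 = (m - 1).toNat := by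
          simp [List.length_take]; omega
        simp only [this]
        rw [List.getElem_take]
      · rw [foldl_small m s a 0 9 le_rfl (by omega)]
        rw [solutionAltLoop, dif_neg (by omega)]

-- ===== VERDICT (by name: the statement is the Claim_ definition above) =====
theorem solution_spec : Claim_equal_solution := by
  intro k m score _
  unfold Spec_solution solution solution_alt
  by_cases hm : m ≤ 0
  · simp only [if_pos hm]
    exact foldl_nonpos m hm _ 0 0 9 le_rfl
  · simp only [if_neg hm]
    exact main_loop m (by omega) _ _ rfl
      (PySem.List.sorted_pairwise_rev score (fun x => x)) 0
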